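-- pv_equiv track=rewrite | github.com/stiven-hidri/mlpr | figimodi/labs/lab08/src/lab08.py | S2_buildDictionary
-- ===== SOURCE A (Python) =====
-- def S2_buildDictionary(lTercets):
--
--     '''
--     Create a dictionary of all words contained in the list of tercets lTercets
--     The dictionary allows storing the words, and mapping each word to an index i (the corresponding index in the array of occurrencies)
--
--     lTercets is a list of tercets (list of strings)
--     '''
--
--     hDict = {}
--     nWords = 0
--     for tercet in lTercets:
--         words = tercet.split()
--         for w in words:
--             if w not in hDict:
--                 hDict[w] = nWords
--                 nWords += 1
--     return hDict
-- ===== SOURCE B (Python) =====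
-- def S2_buildDictionary(lTercets):
--     words = [w for tercet in lTercets for w in tercet.split()]
--     first = {}
--     for pos in reversed(range(len(words))):
--         first[words[pos]] = pos
--     order = sorted(first, key=first.get)
--     return {w: i for i, w in enumerate(order)}
-- ===== Notes on version B (the rewrite author's own statement) =====
-- stated objective: alternative
-- what changed: Replaces A's membership-test-plus-counter single pass by a position-based algorithm: a backward sweep over the flattened word list records each word's first-occurrence position by dict overwriting, then the distinct words are sorted by that position and enumerated.
import Mathlib
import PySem

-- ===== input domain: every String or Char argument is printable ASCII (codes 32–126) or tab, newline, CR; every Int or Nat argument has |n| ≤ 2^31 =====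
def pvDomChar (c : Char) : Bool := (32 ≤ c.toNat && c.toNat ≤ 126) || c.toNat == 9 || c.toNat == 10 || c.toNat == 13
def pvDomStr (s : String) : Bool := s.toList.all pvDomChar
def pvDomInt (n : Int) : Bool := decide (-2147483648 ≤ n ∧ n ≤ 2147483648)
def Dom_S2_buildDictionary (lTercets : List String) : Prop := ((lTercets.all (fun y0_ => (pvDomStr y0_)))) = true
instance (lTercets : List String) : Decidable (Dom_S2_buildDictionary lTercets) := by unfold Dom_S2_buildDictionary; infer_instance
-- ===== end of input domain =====

-- B replaces A's membership-test-plus-counter pass by a backward sweep recording first-occurrence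
-- positions (overwriting), then sorts the distinct words by that position (alternative; same result).

-- ===== PORT A =====
def S2_buildDictionary (lTercets : List String) : List (String × Int) :=
  (lTercets.foldl
    (fun (st : PySem.Dict String Int × Int) tercet =>
      let words := PySem.Str.split₀ tercet
      words.foldl
        (fun st w =>
          if st.1.contains w = false then (st.1.insert w st.2, st.2 + 1) else st)
        st)
    (PySem.Dict.empty, 0)).1.items

-- ===== PORT B =====
def S2_buildDictionary_alt (lTercets : List String) : List (String × Int) :=
  let words := lTercets.flatMap (fun tercet => PySem.Str.split₀ tercet)
  -- for pos in reversed(range(len(words))): first[words[pos]] = pos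
  -- (words[pos]: pos is a nonnegative in-range index, so List.getD is exact here)
  let first := ((List.range words.length).reverse).foldl
      (fun (d : PySem.Dict String Int) pos => d.insert (words.getD pos "") (pos : Int))
      PySem.Dict.empty
  -- sorted(first, key=first.get): every key is present, so first.get returns its value (getD 0 unreachable)
  let order := PySem.List.sorted first.keys (fun w => (first.get? w).getD 0)
  (PySem.List.enumerate order 0).map (fun p => (p.2, p.1))

-- ===== PRECONDITION & SPEC =====
def Spec_S2_buildDictionary (lTercets : List String) (out : List (String × Int)) : Prop := out = S2_buildDictionary_alt lTercets
instance (lTercets : List String) (out : List (String × Int)) : Decidable (Spec_S2_buildDictionary lTercets out) := by unfold Spec_S2_buildDictionary; infer_instance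

-- ===== CLAIM (what is proved, stated in full; the proofs are below) =====
def Claim_equal_S2_buildDictionary : Prop := ∀ (lTercets : List String), Dom_S2_buildDictionary lTercets → Spec_S2_buildDictionary lTercets (S2_buildDictionary lTercets)

-- ===== LEMMAS AND PROOFS =====

-- A's inner loop body, named for the proofs
def pvStep (st : PySem.Dict String Int × Int) (w : String) : PySem.Dict String Int × Int :=
  if st.1.contains w = false then (st.1.insert w st.2, st.2 + 1) else st

lemma pvA_eq_flat (lTercets : List String) :
    S2_buildDictionary lTercets
      = ((lTercets.flatMap (fun tercet => PySem.Str.split₀ tercet)).foldl pvStep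
          (PySem.Dict.empty, 0)).1.items := by
  unfold S2_buildDictionary
  rw [List.foldl_flatMap]
  rfl

-- folding Set.add only appends
lemma pvFoldlAdd_prefix (ws : List String) : ∀ (s : List String),
    ∃ t, ws.foldl PySem.Set.add s = s ++ t := by
  induction ws with
  | nil => exact fun s => ⟨[], by simp⟩
  | cons w ws ih =>
    intro s
    by_cases h : PySem.Set.contains s w = true
    · have hadd : PySem.Set.add s w = s := by
        show (if PySem.Set.contains s w = true then s else s ++ [w]) = s
        rw [if_pos h]
      rw [List.foldl_cons, hadd]; exact ih s
    · have hadd : PySem.Set.add s w = s ++ [w] := by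
        show (if PySem.Set.contains s w = true then s else s ++ [w]) = s ++ [w]
        rw [if_neg h]
      rw [List.foldl_cons, hadd]
      obtain ⟨t, ht⟩ := ih (s ++ [w])
      exact ⟨w :: t, by rw [ht, List.append_assoc]; rfl⟩

-- main invariant: from a dict d whose counter equals its size, A's loop appends
-- exactly the fresh words of ws (first occurrences, in order) with sequential indices
lemma pvMain (ws : List String) : ∀ (d : PySem.Dict String Int), d.keys.Nodup →
    (ws.foldl pvStep (d, (d.items.length : Int))).1.items
      = d.items ++ (PySem.List.enumerate
          ((ws.foldl PySem.Set.add d.keys).drop d.keys.length)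
          (d.items.length : Int)).map (fun p => (p.2, p.1)) := by
  induction ws with
  | nil =>
    intro d _
    have hd : List.drop d.items.length (List.map (fun x => x.1) d.items) = [] := by
      simp [List.drop_eq_nil_iff]
    simp [PySem.Dict.keys, hd]
  | cons w ws ih =>
    intro d hnd
    simp only [List.foldl_cons]
    by_cases h : d.contains w = true
    · have hmem : w ∈ d.keys := (PySem.Dict.contains_iff_mem_keys d w).mp h
      have hstep : pvStep (d, (d.items.length : Int)) w = (d, (d.items.length : Int)) := by
        simp [pvStep, h]
      have hadd : PySem.Set.add d.keys w = d.keys := by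
        simp [PySem.Set.add, PySem.Set.contains, hmem]
      rw [hstep, hadd, ih d hnd]
    · have h' : d.contains w = false := by simpa using h
      have hstep : pvStep (d, (d.items.length : Int))  w
          = (d.insert w (d.items.length : Int), (d.items.length : Int) + 1) := by
        simp [pvStep, h']
      have hitems : (d.insert w (d.items.length : Int)).items
          = d.items ++ [(w, (d.items.length : Int))] :=
        PySem.Dict.items_insert_of_not_contains d _ h'
      have hkeys : (d.insert w (d.items.length : Int)).keys = d.keys ++ [w] :=
        PySem.Dict.keys_insert_of_not_contains d _ h'
      have hnd' : (d.insert w (d.items.length : Int)).keys.Nodup :=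
        PySem.Dict.nodup_keys_insert d _ _ hnd
      have hlen : ((d.insert w (d.items.length : Int)).items.length : Int)
          = (d.items.length : Int) + 1 := by
        rw [hitems, List.length_append, List.length_cons, List.length_nil]
        push_cast; ring
      have hadd : PySem.Set.add d.keys w = d.keys ++ [w] := by
        have hnm : w ∉ d.keys := fun hm =>
          by simp [(PySem.Dict.contains_iff_mem_keys d w).mpr hm] at h'
        simp [PySem.Set.add, PySem.Set.contains, hnm]
      obtain ⟨t, ht⟩ := pvFoldlAdd_prefix ws (d.keys ++ [w])
      have ihd := ih (d.insert w (d.items.length : Int)) hnd'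
      rw [hlen] at ihd
      rw [hstep, ihd, hitems, hkeys, hadd, ht]
      have hdrop1 : ((d.keys ++ [w]) ++ t).drop d.keys.length = w :: t := by
        rw [List.append_assoc, List.drop_left]; rfl
      have hdrop2 : ((d.keys ++ [w]) ++ t).drop (d.keys ++ [w]).length = t :=
        List.drop_left
      rw [hdrop1, hdrop2, PySem.List.enumerate_cons]
      simp

-- reading back the words from their indices gives the word list
lemma pvMapRange (ws : List String) :
    (List.range ws.length).map (fun p => ws.getD p "") = ws := by
  apply List.ext_getElem
  · simp
  · intro i h1 h2
    simp [List.getD_eq_getElem?_getD, List.getElem?_eq_getElem h2]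

-- the first index of range n whose word is w is w's first occurrence
lemma pvFindRange (ws : List String) (w : String) :
    (List.range ws.length).find? (fun p => ws.getD p "" == w)
      = PySem.List.index? ws w := by
  induction ws with
  | nil => simp [PySem.List.index?]
  | cons x xs ih =>
    rw [List.length_cons, List.range_succ_eq_map]
    by_cases hx : x = w
    · subst hx
      rw [List.find?_cons_of_pos (by simp), PySem.List.index?_cons_self]
    · rw [List.find?_cons_of_neg (by simp [hx]), List.find?_map]
      have hcomp : ((fun p => (x :: xs).getD p "" == w) ∘ Nat.succ)
          = (fun p => xs.getD p "" == w) := by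
        funext p; simp
      rw [hcomp, ih, PySem.List.index?_cons_of_ne xs hx]

-- B's backward fold: lookup returns the first matching position of ps.reverse, else d's value
lemma pvFoldGet (ws : List String) (ps : List Nat) : ∀ (d : PySem.Dict String Int) (w : String),
    (ps.foldl (fun (d : PySem.Dict String Int) pos => d.insert (ws.getD pos "") (pos : Int)) d).get? w
      = (match ps.reverse.find? (fun p => ws.getD p "" == w) with
         | some p => some ((p : Int))
         | none => d.get? w) := by
  induction ps with
  | nil => intro d w; simp
  | cons p ps ih =>
    intro d w
    rw [List.foldl_cons, ih, List.reverse_cons, List.find?_append]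
    cases hf : ps.reverse.find? (fun q => ws.getD q "" == w) with
    | some q => simp [Option.or]
    | none =>
      simp only [Option.or, List.find?_cons, List.find?_nil]
      by_cases hw : (ws.getD p "" == w) = true
      · have : w = ws.getD p "" := (eq_of_beq hw).symm
        rw [hw, PySem.Dict.get?_insert, if_pos this]
      · have hne : w ≠ ws.getD p "" := fun h => hw (beq_iff_eq.mpr h.symm)
        rw [eq_false_of_ne_true hw, PySem.Dict.get?_insert, if_neg hne]

-- first occurrences come in strictly increasing index order
lemma pvPairwise (ws : List String) :
    (PySem.Set.ofList ws).Pairwise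
      (fun a b => (PySem.List.index? ws a).getD 0 < (PySem.List.index? ws b).getD 0) := by
  induction ws using List.reverseRecOn with
  | nil => simp [PySem.Set.ofList]
  | append_singleton xs x ih =>
    rw [PySem.Set.ofList_append_singleton]
    by_cases hx : x ∈ xs
    · have hmem : x ∈ PySem.Set.ofList xs := (PySem.Set.mem_ofList xs x).mpr hx
      rw [PySem.Set.add_of_mem hmem]
      refine ih.imp_of_mem ?_
      intro a b ha hb hab
      have ha' : a ∈ xs := (PySem.Set.mem_ofList xs a).mp ha
      have hb' : b ∈ xs := (PySem.Set.mem_ofList xs b).mp hb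
      rwa [PySem.List.index?_append_of_mem [x] ha', PySem.List.index?_append_of_mem [x] hb']
    · have hmem : x ∉ PySem.Set.ofList xs := fun h => hx ((PySem.Set.mem_ofList xs x).mp h)
      rw [PySem.Set.add_of_not_mem hmem]
      rw [List.pairwise_append]
      refine ⟨?_, List.pairwise_singleton _ _, ?_⟩
      · refine ih.imp_of_mem ?_
        intro a b ha hb hab
        have ha' : a ∈ xs := (PySem.Set.mem_ofList xs a).mp ha
        have hb' : b ∈ xs := (PySem.Set.mem_ofList xs b).mp hb
        rwa [PySem.List.index?_append_of_mem [x] ha', PySem.List.index?_append_of_mem [x] hb']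
      · intro a ha b hb
        rw [List.mem_singleton] at hb
        rw [hb]
        have ha' : a ∈ xs := (PySem.Set.mem_ofList xs a).mp ha
        rw [PySem.List.index?_append_of_mem [x] ha',
            PySem.List.index?_append_singleton_self xs x hx]
        obtain ⟨k, hk⟩ := Option.isSome_iff_exists.mp
          ((PySem.List.index?_isSome_iff xs a).mpr ha')
        obtain ⟨hlt, -, -⟩ := PySem.List.getElem_of_index?_eq_some hk
        rw [hk]
        simpa using hlt

-- ===== VERDICT (by name: the statement is the Claim_ definition above) =====
theorem S2_buildDictionary_spec : Claim_equal_S2_buildDictionary := by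
  intro lTercets _
  show S2_buildDictionary lTercets = S2_buildDictionary_alt lTercets
  rw [pvA_eq_flat]
  simp only [S2_buildDictionary_alt]
  set ws := lTercets.flatMap (fun tercet => PySem.Str.split₀ tercet) with hws
  -- characterize B's dict
  set first := ((List.range ws.length).reverse).foldl
      (fun (d : PySem.Dict String Int) pos => d.insert (ws.getD pos "") (pos : Int))
      PySem.Dict.empty with hfirst
  have hkeys : first.keys = PySem.Set.ofList ws.reverse := by
    have hk := PySem.Dict.keys_foldl_insert_key (List.range ws.length).reverse
      (fun pos => ws.getD pos "") (fun _ pos => ((pos : Int)))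
      (PySem.Dict.empty (κ := String) (ν := Int))
    have hmap : (List.map (fun pos => ws.getD pos "") (List.range ws.length).reverse)
        = ws.reverse := by rw [List.map_reverse, pvMapRange]
    rw [hfirst]
    rw [hk, hmap]
    rfl
  have hget : ∀ w ∈ ws, first.get? w
      = (PySem.List.index? ws w).map (fun k => (k : Int)) := by
    intro w hw
    rw [hfirst, pvFoldGet, List.reverse_reverse, pvFindRange]
    obtain ⟨k, hk⟩ := Option.isSome_iff_exists.mp
      ((PySem.List.index?_isSome_iff ws w).mpr hw)
    rw [hk]; rfl
  -- the sort by first position reproduces first-occurrence order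
  have hsorted : PySem.List.sorted first.keys (fun w => (first.get? w).getD 0)
      = PySem.Set.ofList ws := by
    apply PySem.List.sorted_eq_of_perm_of_pairwise_lt
    · rw [hkeys]
      refine (List.perm_ext_iff_of_nodup (PySem.Set.nodup_ofList ws)
        (PySem.Set.nodup_ofList ws.reverse)).mpr ?_
      intro a
      rw [PySem.Set.mem_ofList, PySem.Set.mem_ofList, List.mem_reverse]
    · refine (pvPairwise ws).imp_of_mem ?_
      intro a b ha hb hab
      have ha' : a ∈ ws := (PySem.Set.mem_ofList ws a).mp ha
      have hb' : b ∈ ws := (PySem.Set.mem_ofList ws b).mp hb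
      obtain ⟨k, hk⟩ := Option.isSome_iff_exists.mp
        ((PySem.List.index?_isSome_iff ws a).mpr ha')
      obtain ⟨m, hm⟩ := Option.isSome_iff_exists.mp
        ((PySem.List.index?_isSome_iff ws b).mpr hb')
      rw [hget a ha', hget b hb', hk, hm]
      rw [hk, hm] at hab
      simpa using hab
  rw [hsorted]
  have h := pvMain ws PySem.Dict.empty (by simp)
  simp only [PySem.Dict.keys, PySem.Dict.empty] at h ⊢
  simpa [PySem.Set.ofList] using h
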